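-- pv_equiv track=rewrite | github.com/amaculusbc/planwrite-v2 | app/services/bam_offers.py | _select_internal_id
-- ===== SOURCE A (Python) =====
-- def _select_internal_id(internal_identifiers: list[str]) -> str:
--     """Select the best internal identifier from a list."""
--     if not internal_identifiers:
--         return "evergreen"
--
--     priority_ids = ["fbo", "bet-get", "lpb", "omni", "evergreen", "evergreen2"]
--     generic_ids = {"sportsbook", "bonus-code", "canada", "mo"}
--
--     for priority_id in priority_ids:
--         if priority_id in internal_identifiers:
--             return priority_id
--
--     for internal_id in internal_identifiers:
--         if internal_id not in generic_ids:
--             return internal_id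
--
--     return internal_identifiers[0]
-- ===== SOURCE B (Python) =====
-- def _select_internal_id(internal_identifiers: list[str]) -> str:
--     """Select the best internal identifier from a list (single pass)."""
--     priority_ids = ["fbo", "bet-get", "lpb", "omni", "evergreen", "evergreen2"]
--     generic_ids = {"sportsbook", "bonus-code", "canada", "mo"}
--     rank = {pid: i for i, pid in enumerate(priority_ids)}
--
--     best_rank = None
--     first_non_generic = None
--     for x in internal_identifiers:
--         r = rank.get(x)
--         if r is not None:
--             if best_rank is None or r < best_rank:
--                 best_rank = r
--         elif first_non_generic is None and x not in generic_ids: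
--             first_non_generic = x
--
--     if best_rank is not None:
--         return priority_ids[best_rank]
--     if first_non_generic is not None:
--         return first_non_generic
--     return internal_identifiers[0] if internal_identifiers else "evergreen"
-- ===== Notes on version B (the rewrite author's own statement) =====
-- stated objective: alternative
-- what changed: Replaces A's two sequential scans (one membership test per priority id over the whole list, then a second scan for a non-generic id) by a single pass over the input that maintains the best priority rank (via a precomputed rank dict) and the first non-generic id simultaneously.
import Mathlib
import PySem

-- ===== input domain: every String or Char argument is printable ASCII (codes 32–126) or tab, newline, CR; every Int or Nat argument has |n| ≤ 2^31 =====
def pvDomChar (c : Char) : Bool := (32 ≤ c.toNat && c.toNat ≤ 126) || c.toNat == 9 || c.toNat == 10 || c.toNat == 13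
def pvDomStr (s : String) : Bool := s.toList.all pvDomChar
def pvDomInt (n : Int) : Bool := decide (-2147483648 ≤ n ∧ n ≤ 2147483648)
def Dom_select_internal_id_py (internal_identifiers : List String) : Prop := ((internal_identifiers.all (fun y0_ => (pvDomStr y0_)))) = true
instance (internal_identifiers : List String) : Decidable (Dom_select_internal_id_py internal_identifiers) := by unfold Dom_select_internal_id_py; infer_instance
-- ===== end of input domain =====

-- B replaces A's two sequential scans by a single pass that tracks the best priority
-- rank (via a precomputed rank table) and the first non-generic id simultaneously (objective: alternative).

-- ===== PORT A =====
def pvPriorityIds : List String := ["fbo", "bet-get", "lpb", "omni", "evergreen", "evergreen2"]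
def pvGenericIds : PySem.Set String := PySem.Set.ofList ["sportsbook", "bonus-code", "canada", "mo"]

def select_internal_id_py (internal_identifiers : List String) : String :=
  match internal_identifiers with
  | [] => "evergreen"
  | x0 :: _ =>
    -- first loop: first priority id contained in the input
    match pvPriorityIds.find? (fun p => internal_identifiers.contains p) with
    | some p => p
    | none =>
      -- second loop: first input element not in the generic set
      match internal_identifiers.find? (fun x => ! PySem.Set.contains pvGenericIds x) with
      | some y => y
      | none => x0  -- internal_identifiers[0]

-- ===== PORT B =====
-- rank = {pid: i for i, pid in enumerate(priority_ids)}
def pvRankDict : PySem.Dict String Int :=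
  (PySem.List.enumerate pvPriorityIds).foldl (fun d p => d.insert p.2 p.1) PySem.Dict.empty

-- one iteration of B's single loop, on the state (best_rank, first_non_generic)
def pvStep (acc : Option Int × Option String) (x : String) : Option Int × Option String :=
  match pvRankDict.get? x with
  | some r =>
    match acc.1 with
    | none => (some r, acc.2)
    | some b => (if r < b then some r else some b, acc.2)
  | none =>
    match acc.2 with
    | some _ => acc
    | none => if PySem.Set.contains pvGenericIds x then acc else (acc.1, some x)

def select_internal_id_py_alt (internal_identifiers : List String) : String :=
  let acc := internal_identifiers.foldl pvStep (none, none)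
  match acc.1 with
  | some r => (PySem.List.pyGet? pvPriorityIds r).getD ""  -- priority_ids[best_rank]; r is always in range
  | none =>
    match acc.2 with
    | some y => y
    | none =>
      match internal_identifiers with
      | [] => "evergreen"
      | x0 :: _ => x0

-- ===== PRECONDITION & SPEC =====
def Spec_select_internal_id_py (internal_identifiers : List String) (out : String) : Prop := out = select_internal_id_py_alt internal_identifiers
instance (internal_identifiers : List String) (out : String) : Decidable (Spec_select_internal_id_py internal_identifiers out) := by unfold Spec_select_internal_id_py; infer_instance

-- ===== CLAIM (what is proved, stated in full; the proofs are below) =====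
def Claim_equal_select_internal_id_py : Prop := ∀ (internal_identifiers : List String), Dom_select_internal_id_py internal_identifiers → Spec_select_internal_id_py internal_identifiers (select_internal_id_py internal_identifiers)

-- ===== LEMMAS AND PROOFS =====

theorem rank_eq (x : String) : pvRankDict.get? x =
    if x = "fbo" then some 0 else if x = "bet-get" then some 1 else if x = "lpb" then some 2
    else if x = "omni" then some 3 else if x = "evergreen" then some 4
    else if x = "evergreen2" then some 5 else none := by
  simp [pvRankDict, pvPriorityIds, PySem.List.enumerate, PySem.Dict.get?_insert, PySem.Dict.get?_empty, List.foldl]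
  split_ifs <;> simp_all

-- the two components of B's loop, separately
def pvStepB (b : Option Int) (x : String) : Option Int :=
  match pvRankDict.get? x with
  | some r => match b with
    | none => some r
    | some c => if r < c then some r else some c
  | none => b

def pvStepF (f : Option String) (x : String) : Option String :=
  match pvRankDict.get? x with
  | some _ => f
  | none => match f with
    | some _ => f
    | none => if PySem.Set.contains pvGenericIds x then none else some x

theorem foldl_pvStep (xs : List String) (b : Option Int) (f : Option String) :
    xs.foldl pvStep (b, f) = (xs.foldl pvStepB b, xs.foldl pvStepF f) := by
  induction xs generalizing b f with
  | nil => rfl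
  | cons x xs ih =>
    simp only [List.foldl_cons]
    rw [show pvStep (b, f) x = (pvStepB b x, pvStepF f x) from ?_, ih]
    unfold pvStep pvStepB pvStepF
    cases pvRankDict.get? x <;> cases b <;> cases f <;> simp <;> split_ifs <;> simp

theorem foldB_none (xs : List String) (h : ∀ x ∈ xs, pvRankDict.get? x = none) :
    xs.foldl pvStepB none = none := by
  induction xs with
  | nil => rfl
  | cons x xs ih =>
    simp only [List.foldl_cons]
    rw [show pvStepB none x = none from ?_]
    · exact ih (fun y hy => h y (by simp [hy]))
    · unfold pvStepB; rw [h x (by simp)]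

theorem foldB_min (xs : List String) (b : Option Int) :
    xs.foldl pvStepB b = ((xs.filterMap (fun x => pvRankDict.get? x)).foldl
      (fun c r => match c with | none => some r | some c => if r < c then some r else some c) b) := by
  induction xs generalizing b with
  | nil => rfl
  | cons x xs ih =>
    simp only [List.foldl_cons, List.filterMap_cons]
    cases hx : pvRankDict.get? x with
    | none => simpa [pvStepB, hx] using ih b
    | some r => simpa [pvStepB, hx] using ih _

theorem foldF_some (xs : List String) (y : String) :
    xs.foldl pvStepF (some y) = some y := by
  induction xs with
  | nil => rfl
  | cons x xs ih =>
    simp only [List.foldl_cons]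
    rw [show pvStepF (some y) x = some y from ?_, ih]
    unfold pvStepF; cases pvRankDict.get? x <;> simp

theorem foldF_find (xs : List String) (h : ∀ x ∈ xs, pvRankDict.get? x = none) :
    xs.foldl pvStepF none = xs.find? (fun x => ! PySem.Set.contains pvGenericIds x) := by
  induction xs with
  | nil => rfl
  | cons x xs ih =>
    have hx : pvRankDict.get? x = none := h x (by simp)
    simp only [List.foldl_cons, List.find?_cons]
    cases hg : PySem.Set.contains pvGenericIds x with
    | true =>
      rw [show pvStepF none x = none from by unfold pvStepF; rw [hx]; simp only [hg]; rfl]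
      rw [ih (fun y hy => h y (by simp [hy]))]
      simp only [Bool.not_true]
    | false =>
      rw [show pvStepF none x = some x from by unfold pvStepF; rw [hx]; simp only [hg]; rfl]
      simp only [Bool.not_false, foldF_some]

theorem minfold_some (L : List Int) (c : Int) :
    L.foldl (fun c r => match c with | none => some r | some c => if r < c then some r else some c) (some c)
      = some (L.foldl min c) := by
  induction L generalizing c with
  | nil => rfl
  | cons a t ih =>
    simp only [List.foldl_cons]
    rw [show (if a < c then some a else some c) = some (min c a) from by
      rw [min_def]; split_ifs <;> first | rfl | omega]
    exact ih _

theorem foldB_eq_some (xs : List String) (i : Int)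
    (hmem : ∃ x ∈ xs, pvRankDict.get? x = some i)
    (hlb : ∀ x ∈ xs, ∀ r : Int, pvRankDict.get? x = some r → i ≤ r) :
    xs.foldl pvStepB none = some i := by
  rw [foldB_min]
  have himem : i ∈ xs.filterMap (fun x => pvRankDict.get? x) := by
    rcases hmem with ⟨x, hx, hr⟩
    exact List.mem_filterMap.mpr ⟨x, hx, hr⟩
  have hL : ∀ r ∈ xs.filterMap (fun x => pvRankDict.get? x), i ≤ r := by
    intro r hr
    rcases List.mem_filterMap.mp hr with ⟨x, hx, hxr⟩
    exact hlb x hx r hxr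
  cases hc : xs.filterMap (fun x => pvRankDict.get? x) with
  | nil => rw [hc] at himem; cases himem
  | cons a t =>
    rw [hc] at himem hL
    rw [List.foldl_cons]
    show t.foldl _ (some a) = some i
    rw [minfold_some]
    have : (a :: t).min? = some i := List.min?_eq_some_iff.mpr ⟨himem, hL⟩
    rw [List.min?_cons'] at this
    exact this

theorem alt_eq_of_best (xs : List String) (i : Int)
    (hmem : ∃ x ∈ xs, pvRankDict.get? x = some i)
    (hlb : ∀ x ∈ xs, ∀ r : Int, pvRankDict.get? x = some r → i ≤ r) :
    select_internal_id_py_alt xs = (PySem.List.pyGet? pvPriorityIds i).getD "" := by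
  unfold select_internal_id_py_alt
  rw [foldl_pvStep, foldB_eq_some xs i hmem hlb]

-- ===== VERDICT (by name: the statement is the Claim_ definition above) =====
theorem select_internal_id_main (x0 : String) (rest : List String) :
    select_internal_id_py (x0 :: rest) = select_internal_id_py_alt (x0 :: rest) := by
  by_cases h0 : ("fbo" : String) ∈ x0 :: rest
  · -- "fbo" is the first priority id present
    have hA : select_internal_id_py (x0 :: rest) = "fbo" := by
      have c0 : (x0 :: rest).contains "fbo" = true := by simpa using h0
      simp only [select_internal_id_py, pvPriorityIds, List.find?_cons, c0]
    have hB : select_internal_id_py_alt (x0 :: rest) = "fbo" := by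
      rw [alt_eq_of_best _ (0 : Int) ⟨"fbo", h0, by decide⟩ ?_]
      · decide
      · intro x hx r hr
        rw [rank_eq] at hr
        split_ifs at hr with e0 e1 e2 e3 e4 e5
        · injection hr with hr; omega
        · injection hr with hr; omega
        · injection hr with hr; omega
        · injection hr with hr; omega
        · injection hr with hr; omega
        · injection hr with hr; omega
    rw [hA, hB]
  by_cases h1 : ("bet-get" : String) ∈ x0 :: rest
  · -- "bet-get" is the first priority id present
    have hA : select_internal_id_py (x0 :: rest) = "bet-get" := by
      have c0 : (x0 :: rest).contains "fbo" = false := by simpa using h0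
      have c1 : (x0 :: rest).contains "bet-get" = true := by simpa using h1
      simp only [select_internal_id_py, pvPriorityIds, List.find?_cons, c0, c1]
    have hB : select_internal_id_py_alt (x0 :: rest) = "bet-get" := by
      rw [alt_eq_of_best _ (1 : Int) ⟨"bet-get", h1, by decide⟩ ?_]
      · decide
      · intro x hx r hr
        rw [rank_eq] at hr
        split_ifs at hr with e0 e1 e2 e3 e4 e5
        · subst e0; exact absurd hx h0
        · injection hr with hr; omega
        · injection hr with hr; omega
        · injection hr with hr; omega
        · injection hr with hr; omega
        · injection hr with hr; omega
    rw [hA, hB]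
  by_cases h2 : ("lpb" : String) ∈ x0 :: rest
  · -- "lpb" is the first priority id present
    have hA : select_internal_id_py (x0 :: rest) = "lpb" := by
      have c0 : (x0 :: rest).contains "fbo" = false := by simpa using h0
      have c1 : (x0 :: rest).contains "bet-get" = false := by simpa using h1
      have c2 : (x0 :: rest).contains "lpb" = true := by simpa using h2
      simp only [select_internal_id_py, pvPriorityIds, List.find?_cons, c0, c1, c2]
    have hB : select_internal_id_py_alt (x0 :: rest) = "lpb" := by
      rw [alt_eq_of_best _ (2 : Int) ⟨"lpb", h2, by decide⟩ ?_]
      · decide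
      · intro x hx r hr
        rw [rank_eq] at hr
        split_ifs at hr with e0 e1 e2 e3 e4 e5
        · subst e0; exact absurd hx h0
        · subst e1; exact absurd hx h1
        · injection hr with hr; omega
        · injection hr with hr; omega
        · injection hr with hr; omega
        · injection hr with hr; omega
    rw [hA, hB]
  by_cases h3 : ("omni" : String) ∈ x0 :: rest
  · -- "omni" is the first priority id present
    have hA : select_internal_id_py (x0 :: rest) = "omni" := by
      have c0 : (x0 :: rest).contains "fbo" = false := by simpa using h0
      have c1 : (x0 :: rest).contains "bet-get" = false := by simpa using h1
      have c2 : (x0 :: rest).contains "lpb" = false := by simpa using h2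
      have c3 : (x0 :: rest).contains "omni" = true := by simpa using h3
      simp only [select_internal_id_py, pvPriorityIds, List.find?_cons, c0, c1, c2, c3]
    have hB : select_internal_id_py_alt (x0 :: rest) = "omni" := by
      rw [alt_eq_of_best _ (3 : Int) ⟨"omni", h3, by decide⟩ ?_]
      · decide
      · intro x hx r hr
        rw [rank_eq] at hr
        split_ifs at hr with e0 e1 e2 e3 e4 e5
        · subst e0; exact absurd hx h0
        · subst e1; exact absurd hx h1
        · subst e2; exact absurd hx h2
        · injection hr with hr; omega
        · injection hr with hr; omega
        · injection hr with hr; omega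
    rw [hA, hB]
  by_cases h4 : ("evergreen" : String) ∈ x0 :: rest
  · -- "evergreen" is the first priority id present
    have hA : select_internal_id_py (x0 :: rest) = "evergreen" := by
      have c0 : (x0 :: rest).contains "fbo" = false := by simpa using h0
      have c1 : (x0 :: rest).contains "bet-get" = false := by simpa using h1
      have c2 : (x0 :: rest).contains "lpb" = false := by simpa using h2
      have c3 : (x0 :: rest).contains "omni" = false := by simpa using h3
      have c4 : (x0 :: rest).contains "evergreen" = true := by simpa using h4
      simp only [select_internal_id_py, pvPriorityIds, List.find?_cons, c0, c1, c2, c3, c4]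
    have hB : select_internal_id_py_alt (x0 :: rest) = "evergreen" := by
      rw [alt_eq_of_best _ (4 : Int) ⟨"evergreen", h4, by decide⟩ ?_]
      · decide
      · intro x hx r hr
        rw [rank_eq] at hr
        split_ifs at hr with e0 e1 e2 e3 e4 e5
        · subst e0; exact absurd hx h0
        · subst e1; exact absurd hx h1
        · subst e2; exact absurd hx h2
        · subst e3; exact absurd hx h3
        · injection hr with hr; omega
        · injection hr with hr; omega
    rw [hA, hB]
  by_cases h5 : ("evergreen2" : String) ∈ x0 :: rest
  · -- "evergreen2" is the first priority id present
    have hA : select_internal_id_py (x0 :: rest) = "evergreen2" := by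
      have c0 : (x0 :: rest).contains "fbo" = false := by simpa using h0
      have c1 : (x0 :: rest).contains "bet-get" = false := by simpa using h1
      have c2 : (x0 :: rest).contains "lpb" = false := by simpa using h2
      have c3 : (x0 :: rest).contains "omni" = false := by simpa using h3
      have c4 : (x0 :: rest).contains "evergreen" = false := by simpa using h4
      have c5 : (x0 :: rest).contains "evergreen2" = true := by simpa using h5
      simp only [select_internal_id_py, pvPriorityIds, List.find?_cons, c0, c1, c2, c3, c4, c5]
    have hB : select_internal_id_py_alt (x0 :: rest) = "evergreen2" := by
      rw [alt_eq_of_best _ (5 : Int) ⟨"evergreen2", h5, by decide⟩ ?_]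
      · decide
      · intro x hx r hr
        rw [rank_eq] at hr
        split_ifs at hr with e0 e1 e2 e3 e4 e5
        · subst e0; exact absurd hx h0
        · subst e1; exact absurd hx h1
        · subst e2; exact absurd hx h2
        · subst e3; exact absurd hx h3
        · subst e4; exact absurd hx h4
        · injection hr with hr; omega
    rw [hA, hB]
  · -- no priority id occurs in the input
    have hrk : ∀ x ∈ x0 :: rest, pvRankDict.get? x = none := by
      intro x hx; rw [rank_eq]
      split_ifs with e0 e1 e2 e3 e4 e5
      · subst e0; exact absurd hx h0
      · subst e1; exact absurd hx h1
      · subst e2; exact absurd hx h2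
      · subst e3; exact absurd hx h3
      · subst e4; exact absurd hx h4
      · subst e5; exact absurd hx h5
      · rfl
    have c0 : (x0 :: rest).contains "fbo" = false := by simpa using h0
    have c1 : (x0 :: rest).contains "bet-get" = false := by simpa using h1
    have c2 : (x0 :: rest).contains "lpb" = false := by simpa using h2
    have c3 : (x0 :: rest).contains "omni" = false := by simpa using h3
    have c4 : (x0 :: rest).contains "evergreen" = false := by simpa using h4
    have c5 : (x0 :: rest).contains "evergreen2" = false := by simpa using h5
    unfold select_internal_id_py_alt
    rw [foldl_pvStep, foldB_none _ hrk, foldF_find _ hrk]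
    simp only [select_internal_id_py, pvPriorityIds, List.find?_cons, c0, c1, c2, c3, c4, c5,
      List.find?_nil]

theorem select_internal_id_py_spec : Claim_equal_select_internal_id_py := by
  intro xs _
  unfold Spec_select_internal_id_py
  cases xs with
  | nil => rfl
  | cons x0 rest => exact select_internal_id_main x0 rest
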